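-- pv_equiv track=rewrite | github.com/OutbackData/federal-contract-intelligence-pipeline | Federal-contracts.py | classify_sector
-- ===== SOURCE A (Python) =====
-- HOT_SECTORS = {
--     "Cybersecurity/IT": {
--         "naics_patterns": ["5415", "5182", "54151"],  # Computer design, data processing
--         "heat": 1.7,
--         "growth_rate": 0.22,
--         "trends": ["Zero-trust mandates + CMMC 2.0 compliance", "AI/ML threat detection surge", "Cloud security for DoD/Gov"],
--         "volatility": 0.24
--     },
--     "Defense/Aerospace": {
--         "naics_patterns": ["3364", "5417", "3329", "33641"],  # Aerospace, R&D, metal fab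
--         "heat": 1.5,
--         "growth_rate": 0.14,
--         "trends": ["Hypersonics + drone modernization", "Space Force integration", "Supply chain resilience post-2025 budgets"],
--         "volatility": 0.27
--     },
--     "AI/ML/R&D": {
--         "naics_patterns": ["5417", "54171", "5415"],  # Scientific R&D, computer services
--         "heat": 1.8,
--         "growth_rate": 0.30,
--         "trends": ["DoD AI ethics + autonomous systems", "Predictive analytics for logistics", "Quantum/ML hybrid platforms"],
--         "volatility": 0.31
--     },
--     "Infrastructure/Construction": {
--         "naics_patterns": ["237", "238", "236"],  # Heavy engineering, specialty trades, building
--         "heat": 1.3,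
--         "growth_rate": 0.10,
--         "trends": ["Resilient bases + IIJA extensions", "Green energy infra upgrades", "Cyber-physical security builds"],
--         "volatility": 0.21
--     },
--     "Healthcare/Medical": {
--         "naics_patterns": ["622", "54194", "3391"],  # Hospitals, vet services, medical equip
--         "heat": 1.4,
--         "growth_rate": 0.15,
--         "trends": ["Telehealth + VA expansions", "Biotech for pandemic prep", "Medical supply chain localization"],
--         "volatility": 0.26
--     },
--     "Logistics/Transportation": {
--         "naics_patterns": ["481", "488", "492"],  # Air transport, support, couriers
--         "heat": 1.2,
--         "growth_rate": 0.08,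
--         "trends": ["EV fleet transitions", "Supply chain automation", "Drone logistics for DoD"],
--         "volatility": 0.23
--     },
--     "General Contracts": {
--         "heat": 1.0,
--         "growth_rate": 0.05,
--         "trends": ["Ops efficiency + standard services", "Hybrid remote support", "Sustainability integrations"],
--         "volatility": 0.20
--     }
-- }
--
-- def classify_sector(naics):
--     if not naics or len(naics) < 4:
--         return "General Contracts"
--     prefix = naics[:4]
--     for sector, info in HOT_SECTORS.items():
--         if sector == "General Contracts":
--             continue
--         for pat in info["naics_patterns"]:
--             if prefix.startswith(pat):
--                 return sector
--     return "General Contracts"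
-- ===== SOURCE B (Python) =====
-- # B: one flat pattern->sector table built once (first occurrence wins, 5-char
-- # patterns dropped since a 4-char prefix can never start with them); lookups
-- # replace A's nested startswith scan.
--
-- HOT_SECTORS = {
--     "Cybersecurity/IT": {
--         "naics_patterns": ["5415", "5182", "54151"],
--         "heat": 1.7, "growth_rate": 0.22,
--         "trends": ["Zero-trust mandates + CMMC 2.0 compliance", "AI/ML threat detection surge", "Cloud security for DoD/Gov"],
--         "volatility": 0.24
--     },
--     "Defense/Aerospace": {
--         "naics_patterns": ["3364", "5417", "3329", "33641"],
--         "heat": 1.5, "growth_rate": 0.14,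
--         "trends": ["Hypersonics + drone modernization", "Space Force integration", "Supply chain resilience post-2025 budgets"],
--         "volatility": 0.27
--     },
--     "AI/ML/R&D": {
--         "naics_patterns": ["5417", "54171", "5415"],
--         "heat": 1.8, "growth_rate": 0.30,
--         "trends": ["DoD AI ethics + autonomous systems", "Predictive analytics for logistics", "Quantum/ML hybrid platforms"],
--         "volatility": 0.31
--     },
--     "Infrastructure/Construction": {
--         "naics_patterns": ["237", "238", "236"],
--         "heat": 1.3, "growth_rate": 0.10,
--         "trends": ["Resilient bases + IIJA extensions", "Green energy infra upgrades", "Cyber-physical security builds"],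
--         "volatility": 0.21
--     },
--     "Healthcare/Medical": {
--         "naics_patterns": ["622", "54194", "3391"],
--         "heat": 1.4, "growth_rate": 0.15,
--         "trends": ["Telehealth + VA expansions", "Biotech for pandemic prep", "Medical supply chain localization"],
--         "volatility": 0.26
--     },
--     "Logistics/Transportation": {
--         "naics_patterns": ["481", "488", "492"],
--         "heat": 1.2, "growth_rate": 0.08,
--         "trends": ["EV fleet transitions", "Supply chain automation", "Drone logistics for DoD"],
--         "volatility": 0.23
--     },
--     "General Contracts": {
--         "heat": 1.0, "growth_rate": 0.05,
--         "trends": ["Ops efficiency + standard services", "Hybrid remote support", "Sustainability integrations"],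
--         "volatility": 0.20
--     }
-- }
--
-- _TABLE = {}
-- for _sector, _info in HOT_SECTORS.items():
--     if _sector == "General Contracts":
--         continue
--     for _pat in _info["naics_patterns"]:
--         if len(_pat) <= 4:
--             _TABLE.setdefault(_pat, _sector)
--
--
-- def classify_sector(naics):
--     if not naics or len(naics) < 4:
--         return "General Contracts"
--     prefix = naics[:4]
--     sec = _TABLE.get(prefix)
--     if sec is not None:
--         return sec
--     return _TABLE.get(prefix[:3], "General Contracts")
-- ===== Notes on version B (the rewrite author's own statement) =====
-- stated objective: simpler
-- what changed: A's nested scan over HOT_SECTORS with startswith per pattern is replaced by a flat pattern-to-sector dict built once with first-occurrence-wins setdefault (5-char patterns dropped, since a 4-char prefix can never start with them), after which classification is two direct lookups: the 4-char prefix, then its 3-char head.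
import Mathlib
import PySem

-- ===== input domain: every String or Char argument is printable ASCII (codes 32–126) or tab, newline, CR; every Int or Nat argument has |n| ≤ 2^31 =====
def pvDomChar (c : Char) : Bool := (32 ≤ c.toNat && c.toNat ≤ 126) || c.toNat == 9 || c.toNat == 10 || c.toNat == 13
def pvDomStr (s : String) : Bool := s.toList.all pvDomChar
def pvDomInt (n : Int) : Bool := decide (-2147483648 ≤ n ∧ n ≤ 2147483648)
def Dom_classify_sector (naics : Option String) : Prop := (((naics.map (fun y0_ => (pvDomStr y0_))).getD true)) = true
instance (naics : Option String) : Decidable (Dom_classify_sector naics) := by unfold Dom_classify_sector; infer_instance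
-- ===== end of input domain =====

-- B replaces A's nested sector/pattern startswith scan with one flat
-- pattern→sector table built up front (first occurrence wins, 5-char patterns
-- dropped — they can never match a 4-char prefix) and two direct lookups.
-- Objective: simpler.

-- Module constant HOT_SECTORS, restricted to the only field the function reads
-- ("naics_patterns"; the "General Contracts" entry has none and both programs
-- skip it before reading it, so it carries []).
def hotSectors : List (String × List String) :=
  [("Cybersecurity/IT", ["5415", "5182", "54151"]),
   ("Defense/Aerospace", ["3364", "5417", "3329", "33641"]),
   ("AI/ML/R&D", ["5417", "54171", "5415"]),
   ("Infrastructure/Construction", ["237", "238", "236"]),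
   ("Healthcare/Medical", ["622", "54194", "3391"]),
   ("Logistics/Transportation", ["481", "488", "492"]),
   ("General Contracts", [])]

-- ===== PORT A =====
-- inner loop: for pat in info["naics_patterns"]: if prefix.startswith(pat): return sector
def scanPats (sector : String) (pref : List Char) : List String → Option String
  | [] => none
  | p :: ps =>
    if PySem.Chars.startswith pref p.toList then some sector else scanPats sector pref ps

-- outer loop: for sector, info in HOT_SECTORS.items(): … (continue on "General Contracts")
def scanSectors (pref : List Char) : List (String × List String) → String
  | [] => "General Contracts"
  | (sector, pats) :: rest =>
    if sector = "General Contracts" then scanSectors pref rest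
    else
      match scanPats sector pref pats with
      | some r => r
      | none => scanSectors pref rest

def classify_sector (naics : Option String) : String :=
  match naics with
  | none => "General Contracts"
  | some s =>
    let cs := s.toList
    if cs = [] ∨ cs.length < 4 then "General Contracts"
    else scanSectors (PySem.List.slice cs none (some 4)) hotSectors

-- ===== PORT B =====
-- module-level build of _TABLE: setdefault keeps the first occurrence; patterns
-- longer than 4 characters are dropped.
def buildTable (l : List (String × List String)) : PySem.Dict (List Char) String :=
  l.foldl
    (fun d sp =>
      if sp.1 = "General Contracts" then d
      else
        sp.2.foldl
          (fun d' p =>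
            if p.toList.length ≤ 4 then PySem.Dict.setdefault d' p.toList sp.1 else d')
          d)
    PySem.Dict.empty

def sectorTable : PySem.Dict (List Char) String := buildTable hotSectors

def classify_sector_alt (naics : Option String) : String :=
  match naics with
  | none => "General Contracts"
  | some s =>
    let cs := s.toList
    if cs = [] ∨ cs.length < 4 then "General Contracts"
    else
      let pref := PySem.List.slice cs none (some 4)
      match PySem.Dict.get? sectorTable pref with
      | some sec => sec
      | none =>
        PySem.Dict.getD sectorTable (PySem.List.slice pref none (some 3)) "General Contracts"

-- ===== PRECONDITION & SPEC =====
def Spec_classify_sector (naics : Option String) (out : String) : Prop := out = classify_sector_alt naics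
instance (naics : Option String) (out : String) : Decidable (Spec_classify_sector naics out) := by unfold Spec_classify_sector; infer_instance

-- ===== CLAIM (what is proved, stated in full; the proofs are below) =====
def Claim_equal_classify_sector : Prop := ∀ (naics : Option String), Dom_classify_sector naics → Spec_classify_sector naics (classify_sector naics)

-- ===== LEMMAS AND PROOFS =====

-- The table B builds, as a literal.
lemma tab_eq : sectorTable = PySem.Dict.mk
    [(['5','4','1','5'], "Cybersecurity/IT"), (['5','1','8','2'], "Cybersecurity/IT"),
     (['3','3','6','4'], "Defense/Aerospace"), (['5','4','1','7'], "Defense/Aerospace"),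
     (['3','3','2','9'], "Defense/Aerospace"),
     (['2','3','7'], "Infrastructure/Construction"), (['2','3','8'], "Infrastructure/Construction"),
     (['2','3','6'], "Infrastructure/Construction"),
     (['6','2','2'], "Healthcare/Medical"), (['3','3','9','1'], "Healthcare/Medical"),
     (['4','8','1'], "Logistics/Transportation"), (['4','8','8'], "Logistics/Transportation"),
     (['4','9','2'], "Logistics/Transportation")] := by decide

-- On a 4-character prefix the scan and the two table lookups agree:
-- case split on the 13 pattern keys of the table.
set_option maxHeartbeats 2000000 in
lemma core_eq (a b c d : Char) :
    scanSectors [a, b, c, d] hotSectors =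
      (match PySem.Dict.get? sectorTable [a, b, c, d] with
       | some sec => sec
       | none =>
         PySem.Dict.getD sectorTable (PySem.List.slice [a, b, c, d] none (some 3))
           "General Contracts") := by
  have hsl : PySem.List.slice [a, b, c, d] none (some 3) = [a, b, c] := by
    simp [PySem.List.slice]
  rw [tab_eq, hsl]
  simp only [scanSectors, scanPats, hotSectors, PySem.Chars.startswith,
    List.isPrefixOf, Bool.and_true, Bool.and_false,
    PySem.Dict.getD_eq_get?_getD, PySem.Dict.get?_mk_cons,
    String.reduceToList, if_false, if_true, reduceCtorEq,
    String.reduceEq, reduceIte, Option.getD, Bool.and_eq_true, beq_iff_eq,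
    List.cons.injEq, List.cons_beq_cons, and_true, List.nil_eq, beq_self_eq_true]
  by_cases h1 : ('5' = a ∧ '4' = b ∧ '1' = c ∧ '5' = d)
  · obtain ⟨rfl, rfl, rfl, rfl⟩ := h1
    decide
  by_cases h2 : ('5' = a ∧ '1' = b ∧ '8' = c ∧ '2' = d)
  · obtain ⟨rfl, rfl, rfl, rfl⟩ := h2
    decide
  by_cases h3 : ('3' = a ∧ '3' = b ∧ '6' = c ∧ '4' = d)
  · obtain ⟨rfl, rfl, rfl, rfl⟩ := h3
    decide
  by_cases h4 : ('5' = a ∧ '4' = b ∧ '1' = c ∧ '7' = d)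
  · obtain ⟨rfl, rfl, rfl, rfl⟩ := h4
    decide
  by_cases h5 : ('3' = a ∧ '3' = b ∧ '2' = c ∧ '9' = d)
  · obtain ⟨rfl, rfl, rfl, rfl⟩ := h5
    decide
  by_cases h6 : ('3' = a ∧ '3' = b ∧ '9' = c ∧ '1' = d)
  · obtain ⟨rfl, rfl, rfl, rfl⟩ := h6
    decide
  by_cases h7 : ('2' = a ∧ '3' = b ∧ '7' = c)
  · obtain ⟨rfl, rfl, rfl⟩ := h7
    simp [PySem.Dict.get?_mk_cons, PySem.Dict.get?]
  by_cases h8 : ('2' = a ∧ '3' = b ∧ '8' = c)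
  · obtain ⟨rfl, rfl, rfl⟩ := h8
    simp [PySem.Dict.get?_mk_cons, PySem.Dict.get?]
  by_cases h9 : ('2' = a ∧ '3' = b ∧ '6' = c)
  · obtain ⟨rfl, rfl, rfl⟩ := h9
    simp [PySem.Dict.get?_mk_cons, PySem.Dict.get?]
  by_cases h10 : ('6' = a ∧ '2' = b ∧ '2' = c)
  · obtain ⟨rfl, rfl, rfl⟩ := h10
    simp [PySem.Dict.get?_mk_cons, PySem.Dict.get?]
  by_cases h11 : ('4' = a ∧ '8' = b ∧ '1' = c)
  · obtain ⟨rfl, rfl, rfl⟩ := h11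
    simp [PySem.Dict.get?_mk_cons, PySem.Dict.get?]
  by_cases h12 : ('4' = a ∧ '8' = b ∧ '8' = c)
  · obtain ⟨rfl, rfl, rfl⟩ := h12
    simp [PySem.Dict.get?_mk_cons, PySem.Dict.get?]
  by_cases h13 : ('4' = a ∧ '9' = b ∧ '2' = c)
  · obtain ⟨rfl, rfl, rfl⟩ := h13
    simp [PySem.Dict.get?_mk_cons, PySem.Dict.get?]
  simp [PySem.Dict.get?,
    h1, h2, h3, h4, h5, h6, h7, h8, h9, h10, h11, h12, h13]

-- ===== VERDICT (by name: the statement is the Claim_ definition above) =====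
theorem classify_sector_spec : Claim_equal_classify_sector := by
  intro naics _
  unfold Spec_classify_sector
  match naics with
  | none => rfl
  | some s =>
    simp only [classify_sector, classify_sector_alt]
    by_cases h : s.toList = [] ∨ s.toList.length < 4
    · simp only [if_pos h]
    · simp only [if_neg h]
      obtain ⟨a, b, c, d, t, ht⟩ : ∃ a b c d t, s.toList = a :: b :: c :: d :: t := by
        match hl : s.toList with
        | [] => exact absurd (Or.inl hl) h
        | [x] | [x, y] | [x, y, z] => exact absurd (Or.inr (by simp [hl])) h
        | x :: y :: z :: w :: t => exact ⟨x, y, z, w, t, rfl⟩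
      rw [ht]
      have hs4 : PySem.List.slice (a :: b :: c :: d :: t) none (some 4) = [a, b, c, d] := by
        simp [PySem.List.slice_to]
      rw [hs4]
      exact core_eq a b c d
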